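-- pv_equiv track=rewrite | github.com/sept-usc/Wave | src/utils/find_max_cycle.py | find_max_repeat_cycle
-- ===== SOURCE A (Python) =====
-- def is_primitive(seq):
--     n = len(seq)
--     for i in range(1, n // 2 + 1):
--         if n % i == 0:
--             unit = seq[:i]
--             if unit * (n // i) == seq:
--                 return False
--     return True
--
-- def find_max_repeat_cycle(arr):
--     n = len(arr)
--     best_pattern = None
--     best_count = 1
--     best_starting_idx = 0
--     for length in range(n // 2, 0, -1):
--         for start in range(n - length * 2 + 1):
--             starting_idx = start
--             pattern = arr[start : start + length]
--             if not is_primitive(pattern):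
--                 continue
--             count = 1
--             idx = start + length
--             while idx + length <= n and arr[idx : idx + length] == pattern:
--                 count += 1
--                 idx += length
--             if count > 1 and (
--                 best_pattern is None
--                 or count > best_count
--                 or (count == best_count and starting_idx > best_starting_idx)
--             ):
--                 best_pattern = pattern
--                 best_count = count
--                 best_starting_idx = start
--     if best_pattern is None:
--         return None, None, 1
--     else:
--         return best_starting_idx, best_pattern, best_count
-- ===== SOURCE B (Python) =====
-- def _is_primitive(seq):
--     n = len(seq)
--     return all(n % i != 0 or seq[:i] * (n // i) != seq for i in range(1, n // 2 + 1))
--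
-- def find_max_repeat_cycle(arr):
--     n = len(arr)
--     best_pattern, best_count, best_start = None, 1, 0
--     for length in range(n // 2, 0, -1):
--         # one backward pass: cnt[s] = number of consecutive copies of the block at s
--         cnt = {}
--         for start in range(n - 2 * length, -1, -1):
--             if arr[start:start + length] == arr[start + length:start + 2 * length]:
--                 cnt[start] = cnt.get(start + length, 1) + 1
--         for start in range(n - 2 * length + 1):
--             c = cnt.get(start, 1)
--             if c > 1 and _is_primitive(arr[start:start + length]) and (
--                 c > best_count or (c == best_count and start > best_start)
--                 or best_pattern is None
--             ):
--                 best_pattern, best_count, best_start = arr[start:start + length], c, start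
--     if best_pattern is None:
--         return None, None, 1
--     return best_start, best_pattern, best_count
-- ===== Notes on version B (the rewrite author's own statement) =====
-- stated objective: faster
-- what changed: Replaces the inner while-loop that rescans forward from every start with a single backward pass per length that fills a repetition-count table via the recurrence cnt[s] = cnt[s+L] + 1 when adjacent blocks are equal, and expresses the primitivity helper as an all() over divisors instead of an early-return loop.
import Mathlib
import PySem

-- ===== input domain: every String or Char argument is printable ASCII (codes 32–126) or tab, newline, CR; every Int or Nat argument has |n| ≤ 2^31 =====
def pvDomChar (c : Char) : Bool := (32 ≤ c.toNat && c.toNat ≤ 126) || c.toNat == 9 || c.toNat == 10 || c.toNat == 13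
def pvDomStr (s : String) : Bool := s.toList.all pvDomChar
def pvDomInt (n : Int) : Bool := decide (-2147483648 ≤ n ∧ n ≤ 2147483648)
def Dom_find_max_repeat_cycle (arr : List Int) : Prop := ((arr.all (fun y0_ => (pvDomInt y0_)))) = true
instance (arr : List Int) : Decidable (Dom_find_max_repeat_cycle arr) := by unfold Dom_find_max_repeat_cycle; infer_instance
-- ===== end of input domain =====

-- B replaces A's inner while-loop (which rescans forward from every start) with one backward
-- pass per length filling a repetition-count table; objective: faster (constant-factor).

-- ===== PORT A =====
def isPrimLoop (seq : List Int) (n : Int) : List Int → Bool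
  | [] => true
  | i :: rest =>
    if PySem.Int.mod n i = 0 then
      if PySem.List.pyRepeat (PySem.List.slice seq none (some i)) (PySem.Int.floordiv n i) = seq then
        false
      else isPrimLoop seq n rest
    else isPrimLoop seq n rest

def is_primitive (seq : List Int) : Bool :=
  isPrimLoop seq (seq.length : Int)
    (PySem.List.pyRange 1 (PySem.Int.floordiv (seq.length : Int) 2 + 1) 1)

-- A's while loop; the fuel argument only makes the loop total (arr.length + 1 always suffices
-- since idx grows by length ≥ 1 each step and the loop stops once idx + length > arr.length).
def countLoop (arr pattern : List Int) (length : Int) : Nat → Int → Int → Int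
  | 0, count, _ => count
  | fuel + 1, count, idx =>
    if idx + length ≤ (arr.length : Int) ∧
        PySem.List.slice arr (some idx) (some (idx + length)) = pattern then
      countLoop arr pattern length fuel (count + 1) (idx + length)
    else count

def innerA (arr : List Int) (length : Int) (st : Option (List Int) × Int × Int) (start : Int) :
    Option (List Int) × Int × Int :=
  let pattern := PySem.List.slice arr (some start) (some (start + length))
  if ¬ (is_primitive pattern = true) then st
  else
    let count := countLoop arr pattern length (arr.length + 1) 1 (start + length)
    if count > 1 ∧ (st.1 = none ∨ count > st.2.1 ∨ (count = st.2.1 ∧ start > st.2.2)) then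
      (some pattern, count, start)
    else st

def find_max_repeat_cycle (arr : List Int) : Option Int × Option (List Int) × Int :=
  let n : Int := (arr.length : Int)
  let res := (PySem.List.pyRange (PySem.Int.floordiv n 2) 0 (-1)).foldl
    (fun st length =>
      (PySem.List.pyRange 0 (n - length * 2 + 1) 1).foldl (innerA arr length) st)
    (none, 1, 0)
  match res.1 with
  | none => (none, none, 1)
  | some p => (some res.2.2, some p, res.2.1)

-- ===== PORT B =====
def isPrimAlt (seq : List Int) : Bool :=
  (PySem.List.pyRange 1 (PySem.Int.floordiv (seq.length : Int) 2 + 1) 1).all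
    (fun i =>
      !(PySem.Int.mod (seq.length : Int) i == 0) ||
      !(PySem.List.pyRepeat (PySem.List.slice seq none (some i))
          (PySem.Int.floordiv (seq.length : Int) i) == seq))

def cntDict (arr : List Int) (length : Int) : PySem.Dict Int Int :=
  (PySem.List.pyRange ((arr.length : Int) - 2 * length) (-1) (-1)).foldl
    (fun d start =>
      if PySem.List.slice arr (some start) (some (start + length)) =
          PySem.List.slice arr (some (start + length)) (some (start + 2 * length)) then
        d.insert start (d.getD (start + length) 1 + 1)
      else d)
    PySem.Dict.empty

def innerB (arr : List Int) (length : Int) (d : PySem.Dict Int Int)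
    (st : Option (List Int) × Int × Int) (start : Int) : Option (List Int) × Int × Int :=
  let c := d.getD start 1
  if c > 1 ∧ isPrimAlt (PySem.List.slice arr (some start) (some (start + length))) = true ∧
      (c > st.2.1 ∨ (c = st.2.1 ∧ start > st.2.2) ∨ st.1 = none) then
    (some (PySem.List.slice arr (some start) (some (start + length))), c, start)
  else st

def find_max_repeat_cycle_alt (arr : List Int) : Option Int × Option (List Int) × Int :=
  let n : Int := (arr.length : Int)
  let res := (PySem.List.pyRange (PySem.Int.floordiv n 2) 0 (-1)).foldl
    (fun st length =>
      let d := cntDict arr length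
      (PySem.List.pyRange 0 (n - 2 * length + 1) 1).foldl (innerB arr length d) st)
    (none, 1, 0)
  match res.1 with
  | none => (none, none, 1)
  | some p => (some res.2.2, some p, res.2.1)

-- ===== PRECONDITION & SPEC =====
def Spec_find_max_repeat_cycle (arr : List Int) (out : Option Int × Option (List Int) × Int) : Prop := out = find_max_repeat_cycle_alt arr
instance (arr : List Int) (out : Option Int × Option (List Int) × Int) : Decidable (Spec_find_max_repeat_cycle arr out) := by unfold Spec_find_max_repeat_cycle; infer_instance

-- ===== CLAIM (what is proved, stated in full; the proofs are below) =====
def Claim_equal_find_max_repeat_cycle : Prop := ∀ (arr : List Int), Dom_find_max_repeat_cycle arr → Spec_find_max_repeat_cycle arr (find_max_repeat_cycle arr)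

-- ===== LEMMAS AND PROOFS =====

theorem isPrimLoop_eq_all (seq : List Int) (n : Int) (l : List Int) :
    isPrimLoop seq n l =
      l.all (fun i =>
        !(PySem.Int.mod n i == 0) ||
        !(PySem.List.pyRepeat (PySem.List.slice seq none (some i))
            (PySem.Int.floordiv n i) == seq)) := by
  induction l with
  | nil => rfl
  | cons i rest ih =>
    simp only [isPrimLoop, List.all_cons]
    by_cases h1 : PySem.Int.mod n i = 0
    · by_cases h2 : PySem.List.pyRepeat (PySem.List.slice seq none (some i))
          (PySem.Int.floordiv n i) = seq
      · simp [h1, h2]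
      · simp [h1, h2, ih]
    · simp [h1, ih]

theorem prim_eq (seq : List Int) : is_primitive seq = isPrimAlt seq := by
  simp [is_primitive, isPrimAlt, isPrimLoop_eq_all]

-- the block of length L starting at s, and A's repetition count from start s
def blkA (arr : List Int) (L s : Int) : List Int :=
  PySem.List.slice arr (some s) (some (s + L))

def cA (arr : List Int) (L s : Int) : Int :=
  countLoop arr (blkA arr L s) L (arr.length + 1) 1 (s + L)

theorem countLoop_stable (arr p : List Int) (L : Int) (hL : 1 ≤ L) :
    ∀ (f g : Nat) (c idx : Int),
      (((arr.length : Int) - idx)).toNat < f → (((arr.length : Int) - idx)).toNat < g →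
      countLoop arr p L f c idx = countLoop arr p L g c idx := by
  intro f
  induction f with
  | zero => intro g c idx hf hg; omega
  | succ f ih =>
    intro g c idx hf hg
    cases g with
    | zero => omega
    | succ g =>
      simp only [countLoop]
      by_cases h : idx + L ≤ (arr.length : Int) ∧
          PySem.List.slice arr (some idx) (some (idx + L)) = p
      · rw [if_pos h, if_pos h]
        exact ih g (c + 1) (idx + L) (by omega) (by omega)
      · rw [if_neg h, if_neg h]

theorem countLoop_shift (arr p : List Int) (L : Int) :
    ∀ (f : Nat) (c idx : Int),
      countLoop arr p L f c idx = c - 1 + countLoop arr p L f 1 idx := by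
  intro f
  induction f with
  | zero => intro c idx; simp [countLoop]
  | succ f ih =>
    intro c idx
    simp only [countLoop]
    by_cases h : idx + L ≤ (arr.length : Int) ∧
        PySem.List.slice arr (some idx) (some (idx + L)) = p
    · rw [if_pos h, if_pos h, ih (c + 1), ih (1 + 1)]
      ring
    · rw [if_neg h, if_neg h]
      ring

theorem cA_base (arr : List Int) (L s : Int)
    (h : ¬ (s + L + L ≤ (arr.length : Int) ∧ blkA arr L s = blkA arr L (s + L))) :
    cA arr L s = 1 := by
  simp only [cA, countLoop]
  rw [if_neg]
  intro hc
  exact h ⟨hc.1, hc.2.symm⟩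

theorem cA_rec (arr : List Int) (L s : Int) (hL : 1 ≤ L) (hs : 0 ≤ s)
    (h2 : s + L + L ≤ (arr.length : Int)) (heq : blkA arr L s = blkA arr L (s + L)) :
    cA arr L s = cA arr L (s + L) + 1 := by
  conv_lhs => rw [cA, countLoop]
  rw [if_pos ⟨h2, heq.symm⟩]
  rw [countLoop_shift arr (blkA arr L s) L arr.length (1 + 1), heq]
  rw [countLoop_stable arr (blkA arr L (s + L)) L hL arr.length (arr.length + 1) 1 (s + L + L)
    (by omega) (by omega)]
  show (1 + 1 : Int) - 1 + cA arr L (s + L) = cA arr L (s + L) + 1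
  ring

theorem cnt_fold (arr : List Int) (L : Int) (hL : 1 ≤ L) :
    ∀ (fuel : Nat) (a : Int) (d : PySem.Dict Int Int),
      (a + 1).toNat ≤ fuel →
      a ≤ (arr.length : Int) - (L + L) →
      (∀ k, 0 ≤ k → a < k → d.getD k 1 = cA arr L k) →
      (∀ k, 0 ≤ k → k ≤ a → d.contains k = false) →
      ∀ k, 0 ≤ k →
        ((PySem.List.pyRange a (-1) (-1)).foldl
          (fun d start =>
            if PySem.List.slice arr (some start) (some (start + L)) =
                PySem.List.slice arr (some (start + L)) (some (start + 2 * L)) then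
              d.insert start (d.getD (start + L) 1 + 1)
            else d) d).getD k 1 = cA arr L k := by
  intro fuel
  induction fuel with
  | zero =>
    intro a d hfuel hbound h1 h2 k hk
    rw [PySem.List.pyRange_neg_one_eq_nil (by omega : a ≤ -1)]
    exact h1 k hk (by omega)
  | succ fuel ih =>
    intro a d hfuel hbound h1 h2 k hk
    by_cases ha : a ≤ -1
    · rw [PySem.List.pyRange_neg_one_eq_nil ha]
      exact h1 k hk (by omega)
    · have ha0 : 0 ≤ a := by omega
      rw [PySem.List.pyRange_neg_one_cons (by omega : (-1 : Int) < a), List.foldl_cons]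
      refine ih (a - 1) _ (by omega) (by omega) ?_ ?_ k hk
      · intro k' hk' hak'
        by_cases hka : k' = a
        · subst hka
          by_cases hcond : PySem.List.slice arr (some k') (some (k' + L)) =
              PySem.List.slice arr (some (k' + L)) (some (k' + 2 * L))
          · rw [if_pos hcond, PySem.Dict.getD_insert, if_pos rfl,
              h1 (k' + L) (by omega) (by omega)]
            have heq : blkA arr L k' = blkA arr L (k' + L) := by
              show PySem.List.slice arr (some k') (some (k' + L)) =
                PySem.List.slice arr (some (k' + L)) (some (k' + L + L))
              rw [show k' + L + L = k' + 2 * L from by ring]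
              exact hcond
            exact (cA_rec arr L k' hL hk' (by omega) heq).symm
          · rw [if_neg hcond, PySem.Dict.getD_of_not_contains d 1 (h2 k' hk' le_rfl)]
            refine (cA_base arr L k' ?_).symm
            rintro ⟨-, hb⟩
            apply hcond
            rw [show k' + 2 * L = k' + L + L from by ring]
            exact hb
        · have hgt : a < k' := by omega
          split_ifs with hcond
          · rw [PySem.Dict.getD_insert, if_neg hka]
            exact h1 k' hk' hgt
          · exact h1 k' hk' hgt
      · intro k' hk' hk'a
        split_ifs with hcond
        · rw [PySem.Dict.contains_insert]
          have h2' := h2 k' hk' (by omega)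
          simp [h2']
          omega
        · exact h2 k' hk' (by omega)

theorem cntDict_getD (arr : List Int) (L : Int) (hL : 1 ≤ L) (k : Int) (hk : 0 ≤ k) :
    (cntDict arr L).getD k 1 = cA arr L k := by
  unfold cntDict
  refine cnt_fold arr L hL ((arr.length : Int) - 2 * L + 1).toNat ((arr.length : Int) - 2 * L)
    PySem.Dict.empty (by omega) (by omega) ?_ ?_ k hk
  · intro k' hk' hgt
    rw [PySem.Dict.getD_empty]
    exact (cA_base arr L k' (by rintro ⟨hle, -⟩; omega)).symm
  · intro k' _ _
    simp [PySem.Dict.contains_empty]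

theorem inner_eq (arr : List Int) (L : Int) (hL : 1 ≤ L)
    (st : Option (List Int) × Int × Int) (s : Int) (hs : 0 ≤ s) :
    innerA arr L st s = innerB arr L (cntDict arr L) st s := by
  simp only [innerA, innerB]
  rw [cntDict_getD arr L hL s hs, prim_eq,
    (rfl : countLoop arr (PySem.List.slice arr (some s) (some (s + L))) L (arr.length + 1) 1
      (s + L) = cA arr L s)]
  split_ifs <;> tauto

-- ===== VERDICT (by name: the statement is the Claim_ definition above) =====
theorem find_max_repeat_cycle_spec : Claim_equal_find_max_repeat_cycle := by
  unfold Claim_equal_find_max_repeat_cycle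
  intro arr _
  unfold Spec_find_max_repeat_cycle
  have hfold : (PySem.List.pyRange (PySem.Int.floordiv (arr.length : Int) 2) 0 (-1)).foldl
      (fun st length =>
        (PySem.List.pyRange 0 ((arr.length : Int) - length * 2 + 1) 1).foldl
          (innerA arr length) st) (none, 1, 0)
    = (PySem.List.pyRange (PySem.Int.floordiv (arr.length : Int) 2) 0 (-1)).foldl
      (fun st length =>
        (PySem.List.pyRange 0 ((arr.length : Int) - 2 * length + 1) 1).foldl
          (innerB arr length (cntDict arr length)) st) (none, 1, 0) := by
    apply PySem.List.foldl_congr_mem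
    intro st L hmem
    rw [PySem.List.mem_pyRange_neg_one] at hmem
    have hL : 1 ≤ L := by omega
    rw [show (arr.length : Int) - L * 2 + 1 = (arr.length : Int) - 2 * L + 1 from by ring]
    apply PySem.List.foldl_congr_mem
    intro st' s hsmem
    rw [PySem.List.mem_pyRange_one] at hsmem
    exact inner_eq arr L hL st' s hsmem.1
  simp only [find_max_repeat_cycle, find_max_repeat_cycle_alt]
  rw [hfold]
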